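-- pv_equiv track=rewrite | github.com/athirasureshpuliyayil-ai/athiraps | chatroom/views.py | get_relevant_diseases
-- ===== SOURCE A (Python) =====
-- from collections import defaultdict
--
-- def get_relevant_diseases(confirmed_symptoms, disease_symptom_mapping):
--     """
--     This function identifies diseases related to the user's confirmed symptoms.
--     It returns a dictionary where diseases are keys and the number of confirmed symptoms that match is the value.
--     """
--     disease_match_count = defaultdict(int)
--
--     for disease, symptoms in disease_symptom_mapping.items():
--         for symptom in confirmed_symptoms:
--             if symptom in symptoms:
--                 disease_match_count[disease] += 1
--
--     # Sort diseases based on the number of confirmed symptoms matched (highest first)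
--     sorted_diseases = sorted(
--         disease_match_count.items(), key=lambda x: x[1], reverse=True
--     )
--
--     return sorted_diseases
-- ===== SOURCE B (Python) =====
-- def get_relevant_diseases(confirmed_symptoms, disease_symptom_mapping):
--     # Inverted index: symptom -> diseases whose symptom list mentions it
--     # (deduped per disease, so a repeated symptom in one list counts once,
--     # exactly like A's membership test).
--     index = {}
--     for disease, symptoms in disease_symptom_mapping.items():
--         for symptom in dict.fromkeys(symptoms):
--             index[symptom] = index.get(symptom, []) + [disease]
--     counts = {}
--     for symptom in confirmed_symptoms:
--         for disease in index.get(symptom, []):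
--             counts[disease] = counts.get(disease, 0) + 1
--     pre = [(d, counts[d]) for d in disease_symptom_mapping if d in counts]
--     return sorted(pre, key=lambda x: x[1], reverse=True)
-- ===== Notes on version B (the rewrite author's own statement) =====
-- stated objective: faster
-- what changed: Replaces A's per-disease loop with a linear membership scan over each symptom list per confirmed symptom by a one-pass inverted index (symptom -> diseases) that drives a direct tally over confirmed_symptoms, plus an order-restoring pass over the mapping before the same stable sort; Pre_ only requires distinct disease keys, which every Python dict argument has.
import Mathlib
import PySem

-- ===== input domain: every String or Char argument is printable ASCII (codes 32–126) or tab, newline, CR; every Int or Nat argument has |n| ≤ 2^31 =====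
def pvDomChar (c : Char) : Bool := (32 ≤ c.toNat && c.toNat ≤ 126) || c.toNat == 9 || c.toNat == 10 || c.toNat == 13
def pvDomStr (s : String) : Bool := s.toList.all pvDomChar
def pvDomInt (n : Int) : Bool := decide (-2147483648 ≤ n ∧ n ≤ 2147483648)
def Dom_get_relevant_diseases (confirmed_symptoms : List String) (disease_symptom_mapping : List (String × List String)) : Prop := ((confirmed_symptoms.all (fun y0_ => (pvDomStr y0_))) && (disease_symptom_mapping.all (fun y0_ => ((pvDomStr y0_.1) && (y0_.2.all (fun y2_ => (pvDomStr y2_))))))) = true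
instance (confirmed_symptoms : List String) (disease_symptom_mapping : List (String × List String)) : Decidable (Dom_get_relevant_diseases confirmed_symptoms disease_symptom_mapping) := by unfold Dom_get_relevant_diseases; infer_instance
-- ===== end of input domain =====

-- B replaces A's per-disease membership scans by an inverted index (symptom → diseases)
-- driving a tally over confirmed_symptoms; same stable sort at the end (objective: faster,
-- measured).

-- ===== PORT A =====
def get_relevant_diseases (confirmed_symptoms : List String) (disease_symptom_mapping : List (String × List String)) : List (String × Int) :=
  -- defaultdict(int); d[disease] += 1 is modify with default 0
  let disease_match_count : PySem.Dict String Int :=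
    disease_symptom_mapping.foldl
      (fun d p =>
        confirmed_symptoms.foldl
          (fun d s => if p.2.contains s then d.modify p.1 0 (· + 1) else d) d)
      PySem.Dict.empty
  PySem.List.sorted disease_match_count.items (fun x => x.2) true

-- ===== PORT B =====
def get_relevant_diseases_alt (confirmed_symptoms : List String) (disease_symptom_mapping : List (String × List String)) : List (String × Int) :=
  -- inverted index: symptom -> diseases whose (deduped) symptom list mentions it
  let index : PySem.Dict String (List String) :=
    disease_symptom_mapping.foldl
      (fun ix p =>
        (PySem.List.dedup p.2).foldl (fun ix s => ix.modify s [] (· ++ [p.1])) ix)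
      PySem.Dict.empty
  let counts : PySem.Dict String Int :=
    confirmed_symptoms.foldl
      (fun c s => (index.getD s []).foldl (fun c dd => c.modify dd 0 (· + 1)) c)
      PySem.Dict.empty
  let pre : List (String × Int) :=
    disease_symptom_mapping.foldl
      (fun acc p => if counts.contains p.1 then acc ++ [(p.1, counts.getD p.1 0)] else acc) []
  PySem.List.sorted pre (fun x => x.2) true

-- ===== PRECONDITION & SPEC =====
-- Pre_ requires distinct disease keys: the Python argument is a dict, whose keys are
-- necessarily distinct, so this excludes only association lists that represent no dict.
def Pre_get_relevant_diseases (confirmed_symptoms : List String) (disease_symptom_mapping : List (String × List String)) : Prop :=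
  (disease_symptom_mapping.map Prod.fst).Nodup
instance (confirmed_symptoms : List String) (disease_symptom_mapping : List (String × List String)) : Decidable (Pre_get_relevant_diseases confirmed_symptoms disease_symptom_mapping) := by unfold Pre_get_relevant_diseases; infer_instance
def pvWitness_get_relevant_diseases : List String × (List (String × List String)) := (["a"], [("d", ["a"])])

def Spec_get_relevant_diseases (confirmed_symptoms : List String) (disease_symptom_mapping : List (String × List String)) (out : List (String × Int)) : Prop := out = get_relevant_diseases_alt confirmed_symptoms disease_symptom_mapping
instance (confirmed_symptoms : List String) (disease_symptom_mapping : List (String × List String)) (out : List (String × Int)) : Decidable (Spec_get_relevant_diseases confirmed_symptoms disease_symptom_mapping out) := by unfold Spec_get_relevant_diseases; infer_instance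

-- ===== CLAIM (what is proved, stated in full; the proofs are below) =====
def Claim_equal_get_relevant_diseases : Prop := ∀ (confirmed_symptoms : List String) (disease_symptom_mapping : List (String × List String)), Dom_get_relevant_diseases confirmed_symptoms disease_symptom_mapping → Pre_get_relevant_diseases confirmed_symptoms disease_symptom_mapping → Spec_get_relevant_diseases confirmed_symptoms disease_symptom_mapping (get_relevant_diseases confirmed_symptoms disease_symptom_mapping)

-- ===== LEMMAS AND PROOFS =====
def pvCnt (cs : List String) (p : String × List String) : Nat :=
  cs.countP (fun s => p.2.contains s)

lemma aDict_eq_counter (cs : List String) (m : List (String × List String)) :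
    (m.foldl
      (fun d p => cs.foldl
        (fun d s => if p.2.contains s then d.modify p.1 0 (· + 1) else d) d)
      PySem.Dict.empty)
    = PySem.Dict.counter
        (m.flatMap (fun p => List.replicate (pvCnt cs p) p.1)) := by
  have h1 : ∀ (d : PySem.Dict String Int) (p : String × List String),
      cs.foldl (fun d s => if p.2.contains s then d.modify p.1 0 (· + 1) else d) d
        = (List.replicate (pvCnt cs p) p.1).foldl (fun d x => d.modify x 0 (· + 1)) d := by
    intro d p
    rw [PySem.List.foldl_if_eq_foldl_filter, pvCnt, List.countP_eq_length_filter,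
      ← List.map_const', List.foldl_map]
  simp only [h1]
  rw [← List.foldl_flatMap]
  rfl

lemma set_add_cons (a y : String) (s : List String) (hy : y ≠ a) :
    PySem.Set.add (a :: s) y = a :: PySem.Set.add s y := by
  simp only [PySem.Set.add, PySem.Set.contains]
  simp [hy]
  split <;> rfl

lemma set_update_cons (a : String) (ys : List String) :
    ∀ (s : List String), (∀ y ∈ ys, y ≠ a) →
      PySem.Set.update (a :: s) ys = a :: PySem.Set.update s ys := by
  induction ys with
  | nil => intro s _; rfl
  | cons y t ih =>
    intro s h
    show PySem.Set.update (PySem.Set.add (a :: s) y) t = _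
    rw [set_add_cons a y s (h y (by simp))]
    exact ih _ (fun z hz => h z (by simp [hz]))

lemma set_update_replicate (a : String) (k : Nat) :
    ∀ (s : List String), a ∈ s → PySem.Set.update s (List.replicate k a) = s := by
  induction k with
  | zero => intro s _; rfl
  | succ n ih =>
    intro s hs
    show PySem.Set.update (PySem.Set.add s a) (List.replicate n a) = s
    have : PySem.Set.add s a = s := by simp [PySem.Set.add, PySem.Set.contains, hs]
    rw [this]; exact ih s hs

lemma set_ofList_append (xs ys : List String) :
    PySem.Set.ofList (xs ++ ys) = PySem.Set.update (PySem.Set.ofList xs) ys := by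
  simp [PySem.Set.ofList_eq_foldl, PySem.Set.update, List.foldl_append]

lemma setOfList_blocks (cs : List String) (m : List (String × List String))
    (hk : (m.map Prod.fst).Nodup) :
    PySem.Set.ofList (m.flatMap (fun p => List.replicate (pvCnt cs p) p.1))
      = (m.filter (fun p => pvCnt cs p != 0)).map Prod.fst := by
  induction m with
  | nil => rfl
  | cons h t ih =>
    simp only [List.map_cons, List.nodup_cons] at hk
    have htail : ∀ y ∈ t.flatMap (fun p => List.replicate (pvCnt cs p) p.1), y ≠ h.1 := by
      intro y hy e
      rcases List.mem_flatMap.1 hy with ⟨q, hq, hrep⟩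
      exact hk.1 (by rw [← e, List.eq_of_mem_replicate hrep]; exact List.mem_map_of_mem hq)
    rw [List.flatMap_cons, set_ofList_append]
    rcases Nat.eq_zero_or_pos (pvCnt cs h) with h0 | hpos
    · have : PySem.Set.ofList (List.replicate (pvCnt cs h) h.1) = [] := by
        rw [h0]; rfl
      rw [this]
      have : PySem.Set.update ([] : List String)
          (t.flatMap (fun p => List.replicate (pvCnt cs p) p.1))
          = PySem.Set.ofList (t.flatMap (fun p => List.replicate (pvCnt cs p) p.1)) := rfl
      rw [this, ih hk.2]
      simp [h0]
    · obtain ⟨n, hn⟩ : ∃ n, pvCnt cs h = n + 1 := ⟨pvCnt cs h - 1, by omega⟩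
      have h1 : PySem.Set.ofList (List.replicate (pvCnt cs h) h.1) = [h.1] := by
        rw [hn, List.replicate_succ]
        show PySem.Set.update (PySem.Set.add [] h.1) (List.replicate n h.1) = [h.1]
        have : PySem.Set.add [] h.1 = [h.1] := rfl
        rw [this]
        exact set_update_replicate h.1 n [h.1] (by simp)
      rw [h1, set_update_cons h.1 _ [] htail]
      have : PySem.Set.update ([] : List String)
          (t.flatMap (fun p => List.replicate (pvCnt cs p) p.1))
          = PySem.Set.ofList (t.flatMap (fun p => List.replicate (pvCnt cs p) p.1)) := rfl
      rw [this, ih hk.2]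
      simp [hn]

lemma count_blocks (cs : List String) (m : List (String × List String))
    (hk : (m.map Prod.fst).Nodup) (p : String × List String) (hp : p ∈ m) :
    (m.flatMap (fun p' => List.replicate (pvCnt cs p') p'.1)).count p.1 = pvCnt cs p := by
  induction m with
  | nil => cases hp
  | cons h t ih =>
    simp only [List.map_cons, List.nodup_cons] at hk
    rcases List.mem_cons.1 hp with rfl | hp'
    · have hz : (t.flatMap (fun p' => List.replicate (pvCnt cs p') p'.1)).count p.1 = 0 := by
        rw [List.count_eq_zero]
        intro hmem
        rcases List.mem_flatMap.1 hmem with ⟨q, hq, hrep⟩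
        exact hk.1 (by rw [List.eq_of_mem_replicate hrep]; exact List.mem_map_of_mem hq)
      simp [List.count_append, hz]
    · have hne : h.1 ≠ p.1 := fun e => hk.1 (e ▸ List.mem_map_of_mem hp')
      rw [List.flatMap_cons, List.count_append, ih hk.2 hp']
      simp [List.count_replicate, hne]

def pvTarget (cs : List String) (m : List (String × List String)) : List (String × Int) :=
  (m.filter (fun p => pvCnt cs p != 0)).map (fun p => (p.1, (pvCnt cs p : Int)))

lemma a_pre_eq (cs : List String) (m : List (String × List String))
    (hk : (m.map Prod.fst).Nodup) :
    (m.foldl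
      (fun d p => cs.foldl
        (fun d s => if p.2.contains s then d.modify p.1 0 (· + 1) else d) d)
      PySem.Dict.empty).items = pvTarget cs m := by
  rw [aDict_eq_counter, PySem.Dict.items_counter, setOfList_blocks cs m hk, List.map_map]
  apply List.map_congr_left
  intro p hp
  have hp' := (List.mem_filter.1 hp).1
  simp [count_blocks cs m hk p hp']

def pvL (m : List (String × List String)) : List (String × String) :=
  m.flatMap (fun p => (PySem.List.dedup p.2).map (fun s => (s, p.1)))

def pvM (cs : List String) (m : List (String × List String)) : List String :=
  cs.flatMap (fun s => ((pvL m).filter (fun q => q.1 == s)).map (·.2))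

lemma index_eq (m : List (String × List String)) :
    m.foldl (fun ix p => (PySem.List.dedup p.2).foldl
        (fun ix s => ix.modify s [] (· ++ [p.1])) ix) PySem.Dict.empty
      = (pvL m).foldl (fun d q => d.modify q.1 [] (· ++ [q.2])) PySem.Dict.empty := by
  have h1 : ∀ (ix : PySem.Dict String (List String)) (p : String × List String),
      (PySem.List.dedup p.2).foldl (fun ix s => ix.modify s [] (· ++ [p.1])) ix
        = ((PySem.List.dedup p.2).map (fun s => (s, p.1))).foldl
            (fun d q => d.modify q.1 [] (· ++ [q.2])) ix := by
    intro ix p; rw [List.foldl_map]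
  simp only [h1]
  rw [pvL, ← List.foldl_flatMap]

lemma index_getD (m : List (String × List String)) (s : String) :
    (m.foldl (fun ix p => (PySem.List.dedup p.2).foldl
        (fun ix s => ix.modify s [] (· ++ [p.1])) ix) PySem.Dict.empty).getD s []
      = ((pvL m).filter (fun q => q.1 == s)).map (·.2) := by
  rw [index_eq, PySem.Dict.getD_foldl_modify_append]
  simp

lemma L_countP (m : List (String × List String)) (hk : (m.map Prod.fst).Nodup)
    (p : String × List String) (hp : p ∈ m) (s : String) :
    (pvL m).countP (fun q => q.2 == p.1 && q.1 == s)
      = if p.2.contains s then 1 else 0 := by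
  induction m with
  | nil => cases hp
  | cons h t ih =>
    simp only [List.map_cons, List.nodup_cons] at hk
    rw [pvL, List.flatMap_cons, List.countP_append, List.countP_map]
    rcases List.mem_cons.1 hp with rfl | hp'
    · have hz : (t.flatMap (fun p' => (PySem.List.dedup p'.2).map (fun s' => (s', p'.1)))).countP
          (fun q => q.2 == p.1 && q.1 == s) = 0 := by
        rw [List.countP_eq_zero]
        intro q hq
        rcases List.mem_flatMap.1 hq with ⟨r, hr, hmem⟩
        rcases List.mem_map.1 hmem with ⟨s', _, rfl⟩
        have : r.1 ≠ p.1 := fun e => hk.1 (e ▸ List.mem_map_of_mem hr)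
        simp [this]
      rw [hz]
      have hcong : ∀ s' ∈ PySem.List.dedup p.2,
          ((((fun q => q.2 == p.1 && q.1 == s) ∘ fun s' => (s', p.1)) s') = true
            ↔ ((s' == s) : Bool) = true) := by
        intro s' _; simp
      rw [List.countP_congr hcong, ← List.count_eq_countP]
      by_cases hmem : s ∈ p.2
      · have hd : s ∈ PySem.List.dedup p.2 := (PySem.List.mem_dedup p.2 s).2 hmem
        rw [List.count_eq_one_of_mem (PySem.List.nodup_dedup p.2) hd, if_pos (by simpa using hmem)]
      · have hd : s ∉ PySem.List.dedup p.2 := fun h' => hmem ((PySem.List.mem_dedup p.2 s).1 h')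
        rw [List.count_eq_zero_of_not_mem hd, if_neg (by simpa using hmem)]
    · have hne : h.1 ≠ p.1 := fun e => hk.1 (e ▸ List.mem_map_of_mem hp')
      have hz : (PySem.List.dedup h.2).countP
          ((fun q => q.2 == p.1 && q.1 == s) ∘ fun s' => (s', h.1)) = 0 := by
        rw [List.countP_eq_zero]; intro q _; simp [hne]
      rw [hz]
      simpa [pvL] using ih hk.2 hp'


lemma countP_flatMap_sum {α β : Type} (l : List α) (f : α → List β) (p : β → Bool) :
    (l.flatMap f).countP p = (l.map (fun x => (f x).countP p)).sum := by
  induction l with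
  | nil => simp
  | cons h t ih => simp [List.flatMap_cons, List.countP_append, ih]

lemma M_count (cs : List String) (m : List (String × List String))
    (hk : (m.map Prod.fst).Nodup) (p : String × List String) (hp : p ∈ m) :
    (pvM cs m).count p.1 = pvCnt cs p := by
  rw [List.count_eq_countP, pvM, countP_flatMap_sum]
  have h1 : ∀ s ∈ cs,
      (((pvL m).filter (fun q => q.1 == s)).map (·.2)).countP (fun x => x == p.1)
        = if p.2.contains s then 1 else 0 := by
    intro s _
    rw [List.countP_map, List.countP_filter]
    exact L_countP m hk p hp s
  rw [List.map_congr_left h1]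
  exact PySem.List.sum_map_ite_one_zero_nat (fun s => p.2.contains s) cs

lemma counts_eq (cs : List String) (m : List (String × List String)) :
    cs.foldl
      (fun c s => ((m.foldl (fun ix p => (PySem.List.dedup p.2).foldl
          (fun ix s => ix.modify s [] (· ++ [p.1])) ix) PySem.Dict.empty).getD s []).foldl
        (fun c dd => c.modify dd 0 (· + 1)) c)
      PySem.Dict.empty
      = PySem.Dict.counter (pvM cs m) := by
  simp only [index_getD]
  rw [pvM, ← List.foldl_flatMap]
  rfl

lemma b_pre_eq (cs : List String) (m : List (String × List String))
    (hk : (m.map Prod.fst).Nodup) :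
    (m.foldl
      (fun acc p =>
        if (PySem.Dict.counter (pvM cs m)).contains p.1
        then acc ++ [(p.1, (PySem.Dict.counter (pvM cs m)).getD p.1 0)] else acc) [])
      = pvTarget cs m := by
  rw [PySem.List.foldl_append_if
    (p := fun q => (PySem.Dict.counter (pvM cs m)).contains q.1)
    (f := fun q => (q.1, (PySem.Dict.counter (pvM cs m)).getD q.1 0))
    (l := m) (acc := [])]
  rw [List.nil_append, pvTarget]
  have hfil : m.filter (fun p => (PySem.Dict.counter (pvM cs m)).contains p.1)
      = m.filter (fun p => pvCnt cs p != 0) := by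
    apply List.filter_congr
    intro p hp
    rw [PySem.Dict.contains_counter]
    have hc := M_count cs m hk p hp
    cases hmem : (pvM cs m).contains p.1
    · have : p.1 ∉ pvM cs m := by simpa using hmem
      have : pvCnt cs p = 0 := by rw [← hc]; exact List.count_eq_zero.2 this
      simp [this]
    · have : p.1 ∈ pvM cs m := by simpa using hmem
      have : pvCnt cs p ≠ 0 := by rw [← hc]; have := List.count_pos_iff.2 this; omega
      simp [this]
  rw [hfil]
  apply List.map_congr_left
  intro p hp
  have hp' := (List.mem_filter.1 hp).1
  rw [PySem.Dict.getD_counter, M_count cs m hk p hp']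

-- ===== VERDICT (by name: the statement is the Claim_ definition above) =====
theorem get_relevant_diseases_spec : Claim_equal_get_relevant_diseases := by
  intro cs m _ hk
  unfold Pre_get_relevant_diseases at hk
  unfold Spec_get_relevant_diseases
  simp only [get_relevant_diseases, get_relevant_diseases_alt]
  show PySem.List.sorted
      (m.foldl (fun d p => cs.foldl
        (fun d s => if p.2.contains s then d.modify p.1 0 (· + 1) else d) d)
        (PySem.Dict.empty : PySem.Dict String Int)).items (fun x => x.2) true
    = PySem.List.sorted
      (m.foldl (fun acc p =>
        if (cs.foldl (fun c s =>
              (((m.foldl (fun ix p => (PySem.List.dedup p.2).foldl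
                  (fun ix s => ix.modify s [] (· ++ [p.1])) ix)
                  (PySem.Dict.empty : PySem.Dict String (List String))).getD s []).foldl
                (fun c dd => c.modify dd 0 (· + 1)) c))
              (PySem.Dict.empty : PySem.Dict String Int)).contains p.1
        then acc ++ [(p.1, (cs.foldl (fun c s =>
              (((m.foldl (fun ix p => (PySem.List.dedup p.2).foldl
                  (fun ix s => ix.modify s [] (· ++ [p.1])) ix)
                  (PySem.Dict.empty : PySem.Dict String (List String))).getD s []).foldl
                (fun c dd => c.modify dd 0 (· + 1)) c))
              (PySem.Dict.empty : PySem.Dict String Int)).getD p.1 0)]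
        else acc) []) (fun x => x.2) true
  rw [counts_eq, a_pre_eq cs m hk, b_pre_eq cs m hk]
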